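-- pv_equiv track=rewrite | github.com/tlian25/kickstart_2022 | session_1/milktea/milktea_solution.py | count_complaints
-- ===== SOURCE A (Python) =====
-- class ScoredTea:
--
--     def __init__(self, score:int, tea:str):
--         self.score = score
--         self.tea = tea
--
--
--     def __eq__(self, other):
--         return self.score == other.score
--
--     def __lt__ (self, other):
--         return self.score < other.score
--
--     def __repr__(self):
--         return f"({self.tea},{self.score})"
--
-- def compare(prefix:str, tea:str) -> int:
--
--     difference = 0
--     for i in range(len(prefix)):
--         if prefix[i] != tea[i]:
--             difference += 1
--
--     return difference
--
-- def score(prefix:str, teas:list) -> int: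
--
--     difference = 0
--     for t in teas:
--         difference += compare(prefix, t)
--
--     return difference
--
-- def expand(scoredteas:list, prefix:str, teas:list):
--     zero = prefix + '0'
--     one = prefix + '1'
--
--     scoredteas.append(ScoredTea(score(zero, teas), zero))
--     scoredteas.append(ScoredTea(score(one, teas), one))
--
-- def count_complaints(teas, forbiddens):
--
--     L = len(teas[0])
--     forbiddens = set(forbiddens)
--
--
--     queue = [ ScoredTea(0, "") ]
--
--     # Loop L times for length of tea string
--     for _ in range(L):
--
--         next = []
--
--         for t in queue:
--             expand(next, t.tea, teas)
--
--         next.sort()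
--         queue = next[:len(forbiddens)+1]
--
--
--     # Find lowest score not in forbidden
--     for t in queue:
--         if t.tea not in forbiddens:
--             return t.score
-- ===== SOURCE B (Python) =====
-- def count_complaints(teas, forbiddens):
--     L = len(teas[0])
--     forb = set(forbiddens)
--     K = len(forb) + 1
--
--     # per-position mismatch counts, computed once from the teas
--     mis0 = [sum(t[p] != '0' for t in teas) for p in range(L)]
--     mis1 = [sum(t[p] != '1' for t in teas) for p in range(L)]
--
--     queue = [(0, "")]
--     for p in range(L):
--         nxt = [(s + m, pre + c)
--                for (s, pre) in queue
--                for (m, c) in ((mis0[p], "0"), (mis1[p], "1"))]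
--         nxt.sort(key=lambda x: x[0])
--         queue = nxt[:K]
--
--     for s, pre in queue:
--         if pre not in forb:
--             return s
-- ===== Notes on version B (the rewrite author's own statement) =====
-- stated objective: faster
-- what changed: B precomputes per-position mismatch counts over the teas once and extends each queued candidate's score by an O(1) delta lookup (flat comprehension), instead of A's re-scoring every expanded prefix from scratch by scanning every character of every tea at every level.
-- outside the precondition, e.g. on count_complaints(['0'], ['0', '1']): A returns None, B returns None
import Mathlib
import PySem

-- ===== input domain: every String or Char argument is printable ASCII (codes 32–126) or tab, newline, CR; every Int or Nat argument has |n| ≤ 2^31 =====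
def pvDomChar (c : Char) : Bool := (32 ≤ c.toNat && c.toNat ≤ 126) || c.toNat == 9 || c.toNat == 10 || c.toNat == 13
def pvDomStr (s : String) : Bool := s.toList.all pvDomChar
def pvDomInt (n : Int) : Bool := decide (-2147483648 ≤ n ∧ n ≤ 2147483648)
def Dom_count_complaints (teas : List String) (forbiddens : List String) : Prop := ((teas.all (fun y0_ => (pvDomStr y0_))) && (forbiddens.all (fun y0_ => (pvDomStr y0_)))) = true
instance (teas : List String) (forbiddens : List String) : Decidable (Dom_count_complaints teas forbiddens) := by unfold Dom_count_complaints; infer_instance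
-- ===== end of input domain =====

-- B replaces A's per-candidate rescan of all teas (score/compare) by per-position mismatch
-- counts computed once, updating each candidate's score incrementally; objective: faster.
-- Strings are handled on the List Char side (PySem convention); prefixes are built as char lists.

-- ===== PORT A =====
-- compare(pref, tea): count of positions i < len(pref) with pref[i] != tea[i]
def compareA (pref tea : List Char) : Int :=
  (PySem.List.pyRange 0 (pref.length : Int) 1).foldl
    (fun d i =>
      if PySem.List.pyGetD pref i ' ' ≠ PySem.List.pyGetD tea i ' ' then d + 1 else d) 0

-- score(pref, teas): sum of compare over all teas
def scoreA (pref : List Char) (teas : List (List Char)) : Int :=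
  teas.foldl (fun d t => d + compareA pref t) 0

-- expand(scoredteas, pref, teas): append the two scored extensions
def expandA (scoredteas : List (Int × List Char)) (pref : List Char)
    (teas : List (List Char)) : List (Int × List Char) :=
  let zero := pref ++ ['0']
  let one := pref ++ ['1']
  (scoredteas ++ [(scoreA zero teas, zero)]) ++ [(scoreA one teas, one)]

def count_complaints (teas : List String) (forbiddens : List String) : Int :=
  let tl := teas.map String.toList
  let L := ((PySem.List.pyGet? tl 0).getD []).length     -- teas[0] raises on []: outside Pre_
  let forb : PySem.Set (List Char) := PySem.Set.ofList (forbiddens.map String.toList)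
  let queue :=
    (PySem.List.pyRange 0 (L : Int) 1).foldl
      (fun q _ =>
        let next := q.foldl (fun nx t => expandA nx t.2 tl) []
        (PySem.List.sorted next (fun t => t.1) false).take (forb.length + 1))
      [((0 : Int), ([] : List Char))]
  -- first queue element not in forbiddens; A returns None when there is none: outside Pre_
  ((queue.find? (fun t => !(PySem.Set.contains forb t.2))).map (fun t => t.1)).getD 0

-- ===== PORT B =====
def count_complaints_alt (teas : List String) (forbiddens : List String) : Int :=
  let tl := teas.map String.toList
  let L := ((PySem.List.pyGet? tl 0).getD []).length
  let forb : PySem.Set (List Char) := PySem.Set.ofList (forbiddens.map String.toList)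
  let K := forb.length + 1
  -- mis0[p] / mis1[p]: number of teas whose p-th char differs from '0' / '1'
  let mis0 := (PySem.List.pyRange 0 (L : Int) 1).map
    (fun p => (tl.map (fun t => if PySem.List.pyGetD t p ' ' ≠ '0' then (1 : Int) else 0)).sum)
  let mis1 := (PySem.List.pyRange 0 (L : Int) 1).map
    (fun p => (tl.map (fun t => if PySem.List.pyGetD t p ' ' ≠ '1' then (1 : Int) else 0)).sum)
  let queue :=
    (PySem.List.pyRange 0 (L : Int) 1).foldl
      (fun q p =>
        let nxt := q.flatMap (fun sp =>
          [(sp.1 + PySem.List.pyGetD mis0 p 0, sp.2 ++ ['0']),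
           (sp.1 + PySem.List.pyGetD mis1 p 0, sp.2 ++ ['1'])])
        (PySem.List.sorted nxt (fun t => t.1) false).take K)
      [((0 : Int), ([] : List Char))]
  ((queue.find? (fun t => !(PySem.Set.contains forb t.2))).map (fun t => t.1)).getD 0

-- ===== PRECONDITION & SPEC =====
-- Pre_ excludes exactly the inputs where Python A does not return an int: an empty teas list
-- (IndexError), a tea shorter than teas[0] (IndexError), and inputs whose forbiddens cover all
-- 2^L binary strings of length L, where A (and B) fall off the final loop and return None.
def Pre_count_complaints (teas : List String) (forbiddens : List String) : Prop :=
  teas ≠ [] ∧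
  (∀ t ∈ teas, (teas.headD "").toList.length ≤ t.toList.length) ∧
  (PySem.Set.ofList ((forbiddens.map String.toList).filter
      (fun s => s.length == (teas.headD "").toList.length &&
                s.all (fun c => c == '0' || c == '1')))).length
    < 2 ^ (teas.headD "").toList.length
instance (teas : List String) (forbiddens : List String) : Decidable (Pre_count_complaints teas forbiddens) := by unfold Pre_count_complaints; infer_instance

def pvWitness_count_complaints : List String × List String := (["01", "11", "00"], ["01", "10"])

def Spec_count_complaints (teas : List String) (forbiddens : List String) (out : Int) : Prop := out = count_complaints_alt teas forbiddens
instance (teas : List String) (forbiddens : List String) (out : Int) : Decidable (Spec_count_complaints teas forbiddens out) := by unfold Spec_count_complaints; infer_instance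

-- ===== CLAIM (what is proved, stated in full; the proofs are below) =====
def Claim_equal_count_complaints : Prop := ∀ (teas : List String) (forbiddens : List String), Dom_count_complaints teas forbiddens → Pre_count_complaints teas forbiddens → Spec_count_complaints teas forbiddens (count_complaints teas forbiddens)

-- ===== LEMMAS AND PROOFS =====

theorem compare_snoc (pre : List Char) (b : Char) (t : List Char) :
    compareA (pre ++ [b]) t
      = compareA pre t + (if PySem.List.pyGetD t (pre.length : Int) ' ' ≠ b then 1 else 0) := by
  unfold compareA
  have hlen : ((pre ++ [b]).length : Int) = (pre.length : Int) + 1 := by simp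
  rw [hlen, PySem.List.pyRange_one_succ_right (by positivity), List.foldl_append]
  have hcongr :
      (PySem.List.pyRange 0 (pre.length : Int) 1).foldl
        (fun d i => if PySem.List.pyGetD (pre ++ [b]) i ' ' ≠ PySem.List.pyGetD t i ' ' then d + 1 else d) (0 : Int)
      = (PySem.List.pyRange 0 (pre.length : Int) 1).foldl
        (fun d i => if PySem.List.pyGetD pre i ' ' ≠ PySem.List.pyGetD t i ' ' then d + 1 else d) (0 : Int) := by
    apply PySem.List.foldl_congr_mem
    intro acc i hmem
    have hi := (PySem.List.mem_pyRange_one).1 hmem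
    have h1 : PySem.List.pyGetD (pre ++ [b]) i ' ' = PySem.List.pyGetD pre i ' ' := by
      rw [PySem.List.pyGetD_eq_getElem (pre ++ [b]) ' ' hi.1 (by simp; omega),
          PySem.List.pyGetD_eq_getElem pre ' ' hi.1 (by simpa using hi.2),
          List.getElem_append_left]
    rw [h1]
  rw [hcongr]
  have hb : PySem.List.pyGetD (pre ++ [b]) (pre.length : Int) ' ' = b := by
    rw [PySem.List.pyGetD_eq_getElem (pre ++ [b]) ' ' (by positivity) (by simp)]
    simp
  simp only [List.foldl_cons, List.foldl_nil, hb]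
  by_cases h : PySem.List.pyGetD t (pre.length : Int) ' ' = b
  · rw [if_neg (fun hc => hc h.symm), if_neg (fun hc => hc h), add_zero]
  · rw [if_pos (fun he => h he.symm), if_pos h]

theorem score_snoc (pre : List Char) (b : Char) (tl : List (List Char)) :
    scoreA (pre ++ [b]) tl
      = scoreA pre tl
        + (tl.map (fun t => if PySem.List.pyGetD t (pre.length : Int) ' ' ≠ b then (1 : Int) else 0)).sum := by
  unfold scoreA
  rw [PySem.List.foldl_add, PySem.List.foldl_add]
  have : tl.map (fun t => compareA (pre ++ [b]) t)
      = tl.map (fun t => compareA pre t + (if PySem.List.pyGetD t (pre.length : Int) ' ' ≠ b then 1 else 0)) := by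
    apply List.map_congr_left; intro t _; exact compare_snoc pre b t
  rw [this, PySem.List.sum_map_add_int]
  ring
theorem levels (tl : List (List Char)) (K : Nat) (L : Nat) :
    ∀ (n : Nat) (a : Int) (q : List (Int × List Char)),
    0 ≤ a → a + n ≤ (L : Int) →
    (∀ sp ∈ q, sp.1 = scoreA sp.2 tl ∧ (sp.2.length : Int) = a) →
    (PySem.List.pyRange a (a + n) 1).foldl
      (fun q _ =>
        (PySem.List.sorted (q.foldl (fun nx t => expandA nx t.2 tl) []) (fun t => t.1) false).take K) q
    = (PySem.List.pyRange a (a + n) 1).foldl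
      (fun q p =>
        (PySem.List.sorted (q.flatMap (fun sp =>
          [(sp.1 + PySem.List.pyGetD ((PySem.List.pyRange 0 (L : Int) 1).map
              (fun p' => (tl.map (fun t => if PySem.List.pyGetD t p' ' ' ≠ '0' then (1 : Int) else 0)).sum)) p 0,
            sp.2 ++ ['0']),
           (sp.1 + PySem.List.pyGetD ((PySem.List.pyRange 0 (L : Int) 1).map
              (fun p' => (tl.map (fun t => if PySem.List.pyGetD t p' ' ' ≠ '1' then (1 : Int) else 0)).sum)) p 0,
            sp.2 ++ ['1'])])) (fun t => t.1) false).take K) q := by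
  intro n
  induction n with
  | zero =>
      intro a q ha hle hinv
      rw [PySem.List.pyRange_one_eq_nil (by push_cast; omega)]
      simp
  | succ n ih =>
      intro a q ha hle hinv
      rw [PySem.List.pyRange_one_cons (by push_cast; omega), List.foldl_cons, List.foldl_cons]
      -- the expand loop is a flatMap
      have e1 : (fun (nx : List (Int × List Char)) (t : Int × List Char) => expandA nx t.2 tl)
          = fun nx t => nx ++ [(scoreA (t.2 ++ ['0']) tl, t.2 ++ ['0']),
                               (scoreA (t.2 ++ ['1']) tl, t.2 ++ ['1'])] := by
        funext nx t; simp [expandA]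
      have hnext :
          q.foldl (fun nx t => expandA nx t.2 tl) []
          = q.flatMap (fun sp =>
              [(sp.1 + PySem.List.pyGetD ((PySem.List.pyRange 0 (L : Int) 1).map
                  (fun p' => (tl.map (fun t => if PySem.List.pyGetD t p' ' ' ≠ '0' then (1 : Int) else 0)).sum)) a 0,
                sp.2 ++ ['0']),
               (sp.1 + PySem.List.pyGetD ((PySem.List.pyRange 0 (L : Int) 1).map
                  (fun p' => (tl.map (fun t => if PySem.List.pyGetD t p' ' ' ≠ '1' then (1 : Int) else 0)).sum)) a 0,
                sp.2 ++ ['1'])]) := by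
        rw [e1, PySem.List.foldl_append_eq_flatMap, List.nil_append,
            List.flatMap_def, List.flatMap_def]
        apply congrArg List.flatten
        apply List.map_congr_left
        intro sp hsp
        obtain ⟨hs, hl⟩ := hinv sp hsp
        rw [PySem.List.pyGetD_map_pyRange_of_nonneg _ _ _ _ ha (by push_cast at hle ⊢; omega),
            PySem.List.pyGetD_map_pyRange_of_nonneg _ _ _ _ ha (by push_cast at hle ⊢; omega)]
        rw [score_snoc, score_snoc, hl, hs]
      rw [hnext]
      -- invariant for the next queue
      have hinv' : ∀ sp ∈ (PySem.List.sorted (q.flatMap (fun sp =>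
              [(sp.1 + PySem.List.pyGetD ((PySem.List.pyRange 0 (L : Int) 1).map
                  (fun p' => (tl.map (fun t => if PySem.List.pyGetD t p' ' ' ≠ '0' then (1 : Int) else 0)).sum)) a 0,
                sp.2 ++ ['0']),
               (sp.1 + PySem.List.pyGetD ((PySem.List.pyRange 0 (L : Int) 1).map
                  (fun p' => (tl.map (fun t => if PySem.List.pyGetD t p' ' ' ≠ '1' then (1 : Int) else 0)).sum)) a 0,
                sp.2 ++ ['1'])])) (fun t => t.1) false).take K,
            sp.1 = scoreA sp.2 tl ∧ (sp.2.length : Int) = a + 1 := by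
        intro sp hsp
        have hmem : sp ∈ q.flatMap (fun sp =>
              [(sp.1 + PySem.List.pyGetD ((PySem.List.pyRange 0 (L : Int) 1).map
                  (fun p' => (tl.map (fun t => if PySem.List.pyGetD t p' ' ' ≠ '0' then (1 : Int) else 0)).sum)) a 0,
                sp.2 ++ ['0']),
               (sp.1 + PySem.List.pyGetD ((PySem.List.pyRange 0 (L : Int) 1).map
                  (fun p' => (tl.map (fun t => if PySem.List.pyGetD t p' ' ' ≠ '1' then (1 : Int) else 0)).sum)) a 0,
                sp.2 ++ ['1'])]) :=
          (PySem.List.mem_sorted _ _ _ _).1 (List.mem_of_mem_take hsp)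
        obtain ⟨t, ht, hsp2⟩ := List.mem_flatMap.1 hmem
        obtain ⟨hs, hl⟩ := hinv t ht
        simp only [List.mem_cons, List.not_mem_nil, or_false] at hsp2
        rcases hsp2 with h | h <;> subst h <;> constructor
        · show _ + _ = scoreA (t.2 ++ ['0']) tl
          rw [score_snoc, hs, hl,
              PySem.List.pyGetD_map_pyRange_of_nonneg _ _ _ _ ha (by push_cast at hle ⊢; omega)]
        · show ((t.2 ++ ['0']).length : Int) = a + 1
          simp only [List.length_append, List.length_cons, List.length_nil]
          push_cast
          omega
        · show _ + _ = scoreA (t.2 ++ ['1']) tl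
          rw [score_snoc, hs, hl,
              PySem.List.pyGetD_map_pyRange_of_nonneg _ _ _ _ ha (by push_cast at hle ⊢; omega)]
        · show ((t.2 ++ ['1']).length : Int) = a + 1
          simp only [List.length_append, List.length_cons, List.length_nil]
          push_cast
          omega
      rw [show a + (((n + 1 : Nat)) : Int) = (a + 1) + (n : Int) by push_cast; ring]
      exact ih (a + 1) _ (by omega) (by push_cast at hle ⊢; omega) hinv'
theorem score_nil (tl : List (List Char)) : scoreA [] tl = 0 := by
  unfold scoreA
  rw [PySem.List.foldl_add]
  have : ∀ t ∈ tl, compareA [] t = 0 := by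
    intro t _
    unfold compareA
    rw [show ((([] : List Char)).length : Int) = 0 by simp,
        PySem.List.pyRange_one_eq_nil le_rfl]
    rfl
  rw [List.map_congr_left this]
  simp

theorem ports_eq (teas forbiddens : List String) :
    count_complaints teas forbiddens = count_complaints_alt teas forbiddens := by
  simp only [count_complaints, count_complaints_alt]
  have h := levels (teas.map String.toList)
      ((PySem.Set.ofList (forbiddens.map String.toList)).length + 1)
      (((PySem.List.pyGet? (teas.map String.toList) 0).getD []).length)
      (((PySem.List.pyGet? (teas.map String.toList) 0).getD []).length)
      0 [((0 : Int), ([] : List Char))] le_rfl (by simp)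
      (by
        intro sp hsp
        simp only [List.mem_cons, List.not_mem_nil, or_false] at hsp
        subst hsp
        exact ⟨(score_nil _).symm, by simp⟩)
  simp only [zero_add] at h
  rw [h]

-- ===== VERDICT (by name: the statement is the Claim_ definition above) =====
theorem count_complaints_spec : Claim_equal_count_complaints := by
  intro teas forbiddens _ _
  unfold Spec_count_complaints
  exact ports_eq teas forbiddens
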